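-- pv_equiv track=rewrite | github.com/rogerrojur/nl2sql | code/token_utils.py | search_list_filter
-- ===== SOURCE A (Python) =====
-- import difflib
--
-- def get_similarity(str1, str2):
--     return difflib.SequenceMatcher(None, str1, str2).quick_ratio()
--
-- def search_list_filter(new_list, ix, candidate_set):
--     """
--     函数: 如果ix位置的token在候选列表，延迟匹配(不立刻进行匹配)，而是往后看，找到一个最优的匹配
--     """
--     # 如果有多个，则进行最优匹配
--     # 如token='英语', next_token='补习' ss = {'英语','英语补习','英语补习班'}, 则匹配以最长匹配为准，匹配为 英语补习
--     # 如token='英语', next_token='课' ss = {'英语','英语补习','英语补习班'}, 则匹配为 英语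
--     # 如果token在ss中，不能跳过去，而是判断token+next_token是否也是candidate_set中某一个word的前缀
--     # 这个其实可以变成一个while循环，一直判断下去
--     if new_list[ix] in candidate_set and ix < len(new_list)-1:
--         tmp_token = new_list[ix] + new_list[ix+1]
--         for word in candidate_set:
--             if word.find(tmp_token) != -1 and get_similarity(tmp_token, word) > 0.7:
--                 candidate_set.remove(new_list[ix])
--                 break
--
--     # 如果第一轮没有去掉，则进行持续往后的匹配
--     if new_list[ix] in candidate_set:
--         tmp_token = new_list[ix]
--         end_ix = ix
--         for tx in range(ix+1, len(new_list)):
--             tmp_set = set()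
--             tmp_token = tmp_token + new_list[tx]
--             for word in candidate_set:
--                 if word.find(tmp_token) != -1:
--                     tmp_set.add(word)
--             if len(tmp_set) == 0:
--                 end_ix = tx - 1
--                 break
--         if end_ix > ix:
--             candidate_set.remove(new_list[ix])
--
--     return candidate_set
-- ===== SOURCE B (Python) =====
-- from collections import Counter
--
-- def _sim_gt_07(a, b):
--     # exact integer form of 'difflib quick_ratio(a, b) > 0.7':
--     # quick_ratio = 2*M/T with M = sum over chars of min(count_a, count_b), T = len(a)+len(b)
--     # (both empty gives ratio 1.0 > 0.7)
--     t = len(a) + len(b)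
--     if t == 0:
--         return True
--     cb = Counter(b)
--     m = sum(min(n, cb[c]) for c, n in Counter(a).items())
--     return 20 * m > 7 * t
--
-- def search_list_filter(new_list, ix, candidate_set):
--     # NOTE: like the original, mutates candidate_set in place (remove) and returns it.
--     tok = new_list[ix]
--     # phase 1: one any() over the candidates instead of a scan-with-break
--     if tok in candidate_set and ix < len(new_list) - 1:
--         tt = tok + new_list[ix + 1]
--         if any(tt in w and _sim_gt_07(tt, w) for w in candidate_set):
--             candidate_set.remove(tok)
--     # phase 2: narrow a survivor set as the prefix grows, instead of
--     # rescanning the whole candidate list for every extended prefix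
--     if tok in candidate_set:
--         prefix = tok
--         survivors = candidate_set
--         stop = None
--         for tx in range(ix + 1, len(new_list)):
--             prefix += new_list[tx]
--             survivors = [w for w in survivors if prefix in w]
--             if not survivors:
--                 stop = tx
--                 break
--         if stop is not None and stop > ix + 1:
--             candidate_set.remove(tok)
--     return candidate_set
-- ===== Notes on version B (the rewrite author's own statement) =====
-- stated objective: alternative
-- what changed: Phase 1's scan-with-break becomes a single any(); phase 2 keeps a survivor set that is narrowed as the prefix grows instead of rescanning the full candidate list (and rebuilding a set) for every extended prefix, recording only the first index where the survivors become empty.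
import Mathlib
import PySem

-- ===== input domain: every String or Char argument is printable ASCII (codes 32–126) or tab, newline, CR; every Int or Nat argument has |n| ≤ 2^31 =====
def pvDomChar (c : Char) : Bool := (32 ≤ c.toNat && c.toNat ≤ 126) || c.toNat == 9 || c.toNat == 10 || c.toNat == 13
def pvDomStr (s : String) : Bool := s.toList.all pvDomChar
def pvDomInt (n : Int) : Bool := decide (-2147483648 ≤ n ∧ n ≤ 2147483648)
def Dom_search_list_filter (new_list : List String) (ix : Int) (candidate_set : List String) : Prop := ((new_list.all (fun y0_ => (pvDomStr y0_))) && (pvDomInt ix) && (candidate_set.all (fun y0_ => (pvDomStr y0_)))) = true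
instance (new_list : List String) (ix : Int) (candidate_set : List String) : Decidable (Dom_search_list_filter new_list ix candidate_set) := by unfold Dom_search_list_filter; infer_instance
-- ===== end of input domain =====

-- ===== PORT A =====
-- B differs from A only in how each phase is organised; both mutate candidate_set in
-- place in Python (remove) — the equivalence proved here is about the returned list,
-- which is the same object.

-- get_similarity(a, b) > 0.7, i.e. difflib quick_ratio > 0.7, in exact integer form:
-- quick_ratio = 2*M/(|a|+|b|) with M = sum over chars of min(count_a, count_b), and
-- the float comparison against 0.7 agrees with 20*M > 7*T for all combined lengths
-- reachable here (both empty gives ratio 1.0 > 0.7). Shared by both ports because both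
-- Pythons call the same module helper get_similarity.
def pySimGt (a b : List Char) : Bool :=
  let t := a.length + b.length
  if t = 0 then true
  else 20 * (a.dedup.foldl (fun acc c => acc + min (a.count c) (b.count c)) 0) > 7 * t

-- A's phase-1 loop: first word that contains tmp_token and is similar enough removes
-- new_list[ix] from candidate_set and breaks.
def slfPhase1 (tok tt : String) (words cs : List String) : List String :=
  match words with
  | [] => cs
  | w :: rest =>
    if (PySem.Str.find w tt != -1) && pySimGt tt.toList w.toList then
      (PySem.List.remove? cs tok).getD cs
    else slfPhase1 tok tt rest cs

-- A's phase-2 loop: for each tx rebuild tmp_set from the FULL candidate_set with the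
-- extended prefix; on the first empty tmp_set return end_ix = tx - 1 (break).
def slfPhase2 (nl cs : List String) (txs : List Int) (tmp : String) (endIx : Int) : Int :=
  match txs with
  | [] => endIx
  | tx :: rest =>
    let tmp' := tmp ++ PySem.List.pyGetD nl tx ""
    let tmpSet := cs.foldl (fun s w => if PySem.Str.find w tmp' != -1 then PySem.Set.add s w else s) PySem.Set.empty
    if tmpSet.length = 0 then tx - 1
    else slfPhase2 nl cs rest tmp' endIx

def search_list_filter (new_list : List String) (ix : Int) (candidate_set : List String) : List String :=
  let tok := PySem.List.pyGetD new_list ix ""   -- new_list[ix]; in range under Pre_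
  let cs1 :=
    if candidate_set.contains tok && decide (ix < (new_list.length : Int) - 1) then
      slfPhase1 tok (tok ++ PySem.List.pyGetD new_list (ix + 1) "") candidate_set candidate_set
    else candidate_set
  if cs1.contains tok then
    let endIx := slfPhase2 new_list cs1 (PySem.List.pyRange (ix + 1) new_list.length 1) tok ix
    if endIx > ix then (PySem.List.remove? cs1 tok).getD cs1 else cs1
  else cs1

-- ===== PORT B =====
-- B's phase-2 loop: narrow the survivor list as the prefix grows; return the first tx
-- where it becomes empty (None if it never does).
def slfNarrow (nl : List String) (txs : List Int) (pfx : String) (survivors : List String) : Option Int :=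
  match txs with
  | [] => none
  | tx :: rest =>
    let p' := pfx ++ PySem.List.pyGetD nl tx ""
    let s' := survivors.filter (fun w => PySem.Str.isIn p' w)
    if s'.isEmpty then some tx else slfNarrow nl rest p' s'

def search_list_filter_alt (new_list : List String) (ix : Int) (candidate_set : List String) : List String :=
  let tok := PySem.List.pyGetD new_list ix ""
  let cs1 :=
    if candidate_set.contains tok && decide (ix < (new_list.length : Int) - 1) then
      let tt := tok ++ PySem.List.pyGetD new_list (ix + 1) ""
      if candidate_set.any (fun w => PySem.Str.isIn tt w && pySimGt tt.toList w.toList) then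
        (PySem.List.remove? candidate_set tok).getD candidate_set
      else candidate_set
    else candidate_set
  if cs1.contains tok then
    match slfNarrow new_list (PySem.List.pyRange (ix + 1) new_list.length 1) tok cs1 with
    | some stop => if stop > ix + 1 then (PySem.List.remove? cs1 tok).getD cs1 else cs1
    | none => cs1
  else cs1

-- ===== PRECONDITION & SPEC =====
-- A raises IndexError iff ix is out of range for new_list (new_list[ix] is evaluated
-- unconditionally); Pre_ excludes exactly those inputs.
def Pre_search_list_filter (new_list : List String) (ix : Int) (candidate_set : List String) : Prop :=
  PySem.Raise.InRange new_list.length ix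
instance (new_list : List String) (ix : Int) (candidate_set : List String) : Decidable (Pre_search_list_filter new_list ix candidate_set) := by unfold Pre_search_list_filter; infer_instance

def pvWitness_search_list_filter : List String × Int × List String := (["ab", "c"], 0, ["abc", "x"])

def Spec_search_list_filter (new_list : List String) (ix : Int) (candidate_set : List String) (out : List String) : Prop := out = search_list_filter_alt new_list ix candidate_set
instance (new_list : List String) (ix : Int) (candidate_set : List String) (out : List String) : Decidable (Spec_search_list_filter new_list ix candidate_set out) := by unfold Spec_search_list_filter; infer_instance

-- ===== CLAIM (what is proved, stated in full; the proofs are below) =====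
def Claim_equal_search_list_filter : Prop := ∀ (new_list : List String) (ix : Int) (candidate_set : List String), Dom_search_list_filter new_list ix candidate_set → Pre_search_list_filter new_list ix candidate_set → Spec_search_list_filter new_list ix candidate_set (search_list_filter new_list ix candidate_set)

-- ===== LEMMAS AND PROOFS =====

-- word.find(t) != -1 and t in word test the same thing
theorem findNe_eq_isIn (w t : String) : (PySem.Str.find w t != -1) = PySem.Str.isIn t w := by
  rw [Bool.eq_iff_iff, bne_iff_ne, PySem.Str.find_ne_neg_one_iff, PySem.Str.isIn_iff_infix]

-- a word containing the extended prefix contains the prefix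
theorem isIn_append_mono (p x w : String) (h : PySem.Str.isIn (p ++ x) w = true) :
    PySem.Str.isIn p w = true := by
  rw [PySem.Str.isIn_iff_infix] at h ⊢
  have hp : p.toList <+: (p ++ x).toList := by
    rw [String.toList_append]; exact List.prefix_append _ _
  exact hp.isInfix.trans h

-- filtering by the extended prefix subsumes filtering by the prefix
theorem filter_narrow (p x : String) (cs : List String) :
    (cs.filter (fun w => PySem.Str.isIn p w)).filter (fun w => PySem.Str.isIn (p ++ x) w)
      = cs.filter (fun w => PySem.Str.isIn (p ++ x) w) := by
  rw [List.filter_filter]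
  apply List.filter_congr
  intro w _
  rcases h : PySem.Str.isIn (p ++ x) w with _ | _
  · simp
  · simpa using isIn_append_mono _ _ _ h

-- A's phase-1 loop is 'if any word matches, remove'
theorem slfPhase1_eq_any (tok tt : String) (words cs : List String) :
    slfPhase1 tok tt words cs =
      (if words.any (fun w => PySem.Str.isIn tt w && pySimGt tt.toList w.toList)
       then (PySem.List.remove? cs tok).getD cs else cs) := by
  induction words with
  | nil => simp [slfPhase1]
  | cons w rest ih =>
    simp only [slfPhase1, List.any_cons, findNe_eq_isIn]
    by_cases h : (PySem.Str.isIn tt w && pySimGt tt.toList w.toList) = true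
    · rw [if_pos h, if_pos (by rw [h, Bool.true_or])]
    · rw [if_neg h, ih]
      rw [Bool.not_eq_true] at h
      simp only [h, Bool.false_or]

-- a conditional-insert fold is a fold over the filtered list
theorem foldl_ite_filter {α β : Type} (p : α → Bool) (f : β → α → β) (l : List α) (init : β) :
    l.foldl (fun s w => if p w then f s w else s) init = (l.filter p).foldl f init := by
  induction l generalizing init with
  | nil => rfl
  | cons x xs ih =>
    cases h : p x
    · simp [h, ih]
    · simp [h, ih]

-- A's tmp_set is empty iff no candidate matches
theorem tmpSet_empty_iff (p : String → Bool) (cs : List String) :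
    ((cs.foldl (fun s w => if p w then PySem.Set.add s w else s) PySem.Set.empty).length = 0)
      ↔ (cs.filter p).isEmpty = true := by
  show ((cs.foldl (fun s w => if p w then PySem.Set.add s w else s) ([] : PySem.Set String)).length = 0)
      ↔ (cs.filter p).isEmpty = true
  rw [foldl_ite_filter, List.length_eq_zero_iff, List.isEmpty_iff]
  have hmem := fun x => PySem.Set.mem_ofList (cs.filter p) x
  rw [PySem.Set.ofList_eq_foldl] at hmem
  constructor
  · intro h
    rcases hfp : cs.filter p with _ | ⟨y, ys⟩
    · rfl
    · exfalso
      have hy : y ∈ (cs.filter p).foldl PySem.Set.add ([] : PySem.Set String) := by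
        rw [hmem, hfp]; exact List.mem_cons_self
      rw [h] at hy
      exact absurd hy List.not_mem_nil
  · intro h
    rw [h]; rfl

-- narrowing from an already-filtered survivor list is the same as narrowing from cs
theorem slfNarrow_filter (nl : List String) (txs : List Int) (pfx : String) (cs : List String) :
    slfNarrow nl txs pfx (cs.filter (fun w => PySem.Str.isIn pfx w))
      = slfNarrow nl txs pfx cs := by
  cases txs with
  | nil => rfl
  | cons tx rest =>
    simp only [slfNarrow]
    rw [filter_narrow]

-- A's full-rescan loop equals B's narrowing loop started from the filtered survivors
theorem slfPhase2_eq_narrow (nl cs : List String) (txs : List Int) (pfx : String) (endIx : Int) :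
    slfPhase2 nl cs txs pfx endIx =
      (match slfNarrow nl txs pfx (cs.filter (fun w => PySem.Str.isIn pfx w)) with
       | some tx => tx - 1
       | none => endIx) := by
  induction txs generalizing pfx with
  | nil => rfl
  | cons tx rest ih =>
    simp only [slfPhase2, slfNarrow, findNe_eq_isIn]
    rw [filter_narrow]
    by_cases hemp : (cs.filter (fun w => PySem.Str.isIn (pfx ++ PySem.List.pyGetD nl tx "") w)).isEmpty = true
    · rw [if_pos ((tmpSet_empty_iff (fun w => PySem.Str.isIn (pfx ++ PySem.List.pyGetD nl tx "") w) cs).2 hemp),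
          if_pos hemp]
    · rw [if_neg (fun h => hemp ((tmpSet_empty_iff (fun w => PySem.Str.isIn (pfx ++ PySem.List.pyGetD nl tx "") w) cs).1 h)),
          if_neg hemp]
      rw [ih, slfNarrow_filter]

-- ===== VERDICT (by name: the statement is the Claim_ definition above) =====
theorem search_list_filter_spec : Claim_equal_search_list_filter := by
  intro new_list ix candidate_set _hdom _hpre
  unfold Spec_search_list_filter search_list_filter search_list_filter_alt
  dsimp only
  rw [slfPhase1_eq_any]
  generalize (if candidate_set.contains (PySem.List.pyGetD new_list ix "")
        && decide (ix < (new_list.length : Int) - 1) then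
      (if candidate_set.any (fun w =>
            PySem.Str.isIn (PySem.List.pyGetD new_list ix "" ++ PySem.List.pyGetD new_list (ix + 1) "") w
            && pySimGt (PySem.List.pyGetD new_list ix "" ++ PySem.List.pyGetD new_list (ix + 1) "").toList w.toList)
       then (PySem.List.remove? candidate_set (PySem.List.pyGetD new_list ix "")).getD candidate_set
       else candidate_set)
    else candidate_set) = cs1
  by_cases hmem : cs1.contains (PySem.List.pyGetD new_list ix "") = true
  · rw [if_pos hmem, if_pos hmem]
    rw [slfPhase2_eq_narrow, slfNarrow_filter]
    rcases hn : slfNarrow new_list (PySem.List.pyRange (ix + 1) new_list.length 1)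
        (PySem.List.pyGetD new_list ix "") cs1 with _ | stop
    · simp
    · simp only
      by_cases hgt : stop - 1 > ix
      · rw [if_pos hgt, if_pos (by omega)]
      · rw [if_neg hgt, if_neg (by omega)]
  · rw [if_neg hmem, if_neg hmem]
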